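-- pv_equiv track=rewrite | github.com/abishekabi/CCN-P2 | sender.py | compute
-- ===== SOURCE A (Python) =====
-- def compute(data):
--     chk_sum = 0
--     for i in range(0, len(data), 2):
--         if (i+1) < len(data):
--             pos_1 = ord(data[i])
--             pos_2 = ord(data[i+1])
--             chk_sum = chk_sum + (pos_1+(pos_2 << 8))
--         elif (i+1)==len(data):
--             chk_sum += ord(data[i])
--         else:
--             raise "Error at CS compute"
--     chk_sum = chk_sum + (chk_sum >> 16)
--     chk_sum = ~chk_sum & 0xffff
--     return chk_sum
-- ===== SOURCE B (Python) =====
-- def compute(data):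
--     chk_sum = sum(ord(c) << (8 * (i % 2)) for i, c in enumerate(data))
--     chk_sum = chk_sum + (chk_sum >> 16)
--     return ~chk_sum & 0xffff
-- ===== Notes on version B (the rewrite author's own statement) =====
-- stated objective: simpler
-- what changed: Replaces the index-stepping per-pair loop with three branches by a single enumerate pass that shifts each character by 8*(index%2), folding the pairing into the shift amount.
import Mathlib
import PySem

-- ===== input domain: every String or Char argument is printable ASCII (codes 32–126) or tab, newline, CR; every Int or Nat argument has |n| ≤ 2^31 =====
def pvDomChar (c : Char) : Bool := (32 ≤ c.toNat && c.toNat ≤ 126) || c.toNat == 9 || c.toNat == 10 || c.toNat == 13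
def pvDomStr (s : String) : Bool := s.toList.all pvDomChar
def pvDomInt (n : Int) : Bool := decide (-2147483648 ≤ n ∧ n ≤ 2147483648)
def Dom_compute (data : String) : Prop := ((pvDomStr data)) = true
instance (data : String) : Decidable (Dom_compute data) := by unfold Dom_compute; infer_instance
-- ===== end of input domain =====

-- B replaces A's per-pair indexed loop by one enumerate pass shifting each char by 8*(i%2); objective: simpler.

-- ===== PORT A =====
-- A's loop over i in range(0, len, 2): each step consumes two chars (i+1 < len)
-- or the final single char (i+1 == len); the raise branch is unreachable.
def computeLoopA : List Char → Int → Int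
  | [], acc => acc
  | [c], acc => acc + (c.toNat : Int)
  | c1 :: c2 :: rest, acc => computeLoopA rest (acc + ((c1.toNat : Int) + (c2.toNat : Int) * 256))

def compute (data : String) : Int :=
  let chk := computeLoopA data.toList 0
  let chk := chk + PySem.Int.floordiv chk 65536      -- chk_sum += chk_sum >> 16
  PySem.Int.mod (-chk - 1) 65536                     -- ~chk_sum & 0xffff

-- ===== PORT B =====
def compute_alt (data : String) : Int :=
  let chk := ((PySem.List.enumerate data.toList).map
      (fun p => (p.2.toNat : Int) * 2 ^ (8 * (PySem.Int.mod p.1 2)).toNat)).sum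
  let chk := chk + PySem.Int.floordiv chk 65536
  PySem.Int.mod (-chk - 1) 65536

-- ===== PRECONDITION & SPEC =====
def Spec_compute (data : String) (out : Int) : Prop := out = compute_alt data
instance (data : String) (out : Int) : Decidable (Spec_compute data out) := by unfold Spec_compute; infer_instance

-- ===== CLAIM (what is proved, stated in full; the proofs are below) =====
def Claim_equal_compute : Prop := ∀ (data : String), Dom_compute data → Spec_compute data (compute data)

-- ===== LEMMAS AND PROOFS =====
lemma computeLoopA_eq (l : List Char) (n : Int) (hn : 0 ≤ n) (he : n % 2 = 0) (acc : Int) :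
    computeLoopA l acc =
      acc + ((PySem.List.enumerate l n).map
        (fun p => (p.2.toNat : Int) * 2 ^ (8 * (PySem.Int.mod p.1 2)).toNat)).sum := by
  induction l, acc using computeLoopA.induct generalizing n with
  | case1 acc => simp [computeLoopA, PySem.List.enumerate]
  | case2 acc c =>
      simp [computeLoopA, PySem.List.enumerate, he]
  | case3 acc c1 c2 rest ih =>
      have h2 : (n + 1) % 2 = 1 := by omega
      rw [computeLoopA, ih (n + 1 + 1) (by omega) (by omega)]
      simp [PySem.List.enumerate, he, h2]
      ring

-- ===== VERDICT (by name: the statement is the Claim_ definition above) =====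
theorem compute_spec : Claim_equal_compute := by
  intro data _
  unfold Spec_compute compute compute_alt
  rw [computeLoopA_eq data.toList 0 le_rfl rfl 0, zero_add]
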